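-- pv_equiv track=rewrite | github.com/grapheneaffiliate/h4-polytopic-attention | solve_arc_b12.py | solve_88a10436
-- ===== SOURCE A (Python) =====
-- def solve_88a10436(grid):
--     rows = len(grid)
--     cols = len(grid[0])
--     out = [row[:] for row in grid]
--
--     # Find the 5
--     five_r, five_c = -1, -1
--     for r in range(rows):
--         for c in range(cols):
--             if grid[r][c] == 5:
--                 five_r, five_c = r, c
--
--     # Find the pattern (all non-zero, non-5 cells)
--     pattern_cells = []
--     for r in range(rows):
--         for c in range(cols):
--             if grid[r][c] != 0 and grid[r][c] != 5:
--                 pattern_cells.append((r, c, grid[r][c]))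
--
--     if not pattern_cells:
--         return out
--
--     # Bounding box of pattern
--     pat_min_r = min(r for r, c, v in pattern_cells)
--     pat_max_r = max(r for r, c, v in pattern_cells)
--     pat_min_c = min(c for r, c, v in pattern_cells)
--     pat_max_c = max(c for r, c, v in pattern_cells)
--
--     # Extract pattern
--     pat_h = pat_max_r - pat_min_r + 1
--     pat_w = pat_max_c - pat_min_c + 1
--     pattern = [[0]*pat_w for _ in range(pat_h)]
--     for r, c, v in pattern_cells:
--         pattern[r - pat_min_r][c - pat_min_c] = v
--
--     # The 5's position corresponds to relative (1,1) in the pattern's bounding box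
--     # Actually let me figure out the anchor more carefully
--     # The 5 position maps to the pattern position that is 1 row and 1 col from the top-left of bounding box
--     # Copy top-left = (five_r - 1, five_c - 1)
--
--     # Actually I need to figure out the anchor within the pattern more carefully.
--     # Let me try: the anchor is at the center of the pattern bounding box, or the 5 position
--     # relative to the pattern determines where to copy.
--
--     # Alternative: the 5 replaces the cell that would be at position (five_r, five_c)
--     # if we shift the pattern to center on 5.
--     # In the output, the 5 is removed and the pattern is placed at a specific offset.
--
--     # From analysis: anchor = (1, 1) relative to pattern bounding box for all examples.
--     # But that might be pattern-specific. Let me check if there's a better rule.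
--
--     # Actually, in train 1 pattern: [[6,0,0],[1,1,0],[2,2,2]] at (0,4)-(2,6).
--     # The anchor (1,1) relative = (1,5) absolute. But the pattern cell at (1,5) = 1.
--     # And in the original grid, (1,5) = 1. So the anchor is where the pattern has a non-zero value.
--
--     # In train 2 pattern: [[2,2,0],[0,3,1],[3,3,1]] at (6,1)-(8,3).
--     # Anchor (1,1) relative = (7,2). Pattern cell = 3.
--
--     # I think the anchor is just the center-ish cell. Let me use (1,1) for now.
--     # But if the pattern is larger, this might not work. Let me use a more robust approach.
--
--     # The 5 position relative to the pattern: compute offset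
--     # offset_r = five_r - pat_min_r, offset_c = five_c - pat_min_c
--     # But 5 is not within the pattern. Hmm.
--
--     # OK let me think about this differently.
--     # The pattern occupies a region. The 5 is elsewhere.
--     # We need to place a copy of the pattern near the 5.
--     # The copy offset: copy_min_r = five_r - anchor_r, copy_min_c = five_c - anchor_c
--     # Where anchor_r, anchor_c is the reference point within the pattern.
--
--     # From training:
--     # Train 0: pat at (0,0), 5 at (5,5), copy at (4,4). anchor = (5-4, 5-4) = (1,1).
--     # Train 1: pat at (0,4), 5 at (5,1), copy at (4,0). anchor = (5-4, 1-0) = (1,1).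
--     # Train 2: pat at (6,1), 5 at (2,4), copy at (1,3). anchor = (2-1, 4-3) = (1,1).
--
--     anchor_r, anchor_c = 1, 1
--     copy_min_r = five_r - anchor_r
--     copy_min_c = five_c - anchor_c
--
--     # Remove the 5
--     out[five_r][five_c] = 0
--
--     # Place the copy
--     for r in range(pat_h):
--         for c in range(pat_w):
--             if pattern[r][c] != 0:
--                 nr, nc = copy_min_r + r, copy_min_c + c
--                 if 0 <= nr < rows and 0 <= nc < cols:
--                     out[nr][nc] = pattern[r][c]
--
--     return out
-- ===== SOURCE B (Python) =====
-- def solve_88a10436(grid):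
--     rows = len(grid)
--     cols = len(grid[0])
--     out = [row[:] for row in grid]
--
--     # One pass: track the last 5 seen and collect the sparse pattern cells
--     # (non-zero, non-5) in row-major order.
--     five_r, five_c = -1, -1
--     cells = []
--     for r in range(rows):
--         for c in range(cols):
--             v = grid[r][c]
--             if v == 5:
--                 five_r, five_c = r, c
--             elif v != 0:
--                 cells.append((r, c, v))
--
--     if not cells:
--         return out
--
--     min_r = min(r for r, c, v in cells)
--     min_c = min(c for r, c, v in cells)
--
--     # Remove the 5, then stamp the sparse cells directly: each cell lands so
--     # that the pattern's bounding-box top-left corner sits at (five_r-1, five_c-1).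
--     out[five_r][five_c] = 0
--     for r, c, v in cells:
--         nr = five_r - 1 + (r - min_r)
--         nc = five_c - 1 + (c - min_c)
--         if 0 <= nr < rows and 0 <= nc < cols:
--             out[nr][nc] = v
--     return out
-- ===== Notes on version B (the rewrite author's own statement) =====
-- stated objective: simpler
-- what changed: One fused scan finds the 5 and collects the sparse pattern-cell list, and the output is produced by stamping that sparse list directly (offset by the bounding-box minima), dropping A's second scan, the max computations, the dense bounding-box pattern matrix and its re-scan.
import Mathlib
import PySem

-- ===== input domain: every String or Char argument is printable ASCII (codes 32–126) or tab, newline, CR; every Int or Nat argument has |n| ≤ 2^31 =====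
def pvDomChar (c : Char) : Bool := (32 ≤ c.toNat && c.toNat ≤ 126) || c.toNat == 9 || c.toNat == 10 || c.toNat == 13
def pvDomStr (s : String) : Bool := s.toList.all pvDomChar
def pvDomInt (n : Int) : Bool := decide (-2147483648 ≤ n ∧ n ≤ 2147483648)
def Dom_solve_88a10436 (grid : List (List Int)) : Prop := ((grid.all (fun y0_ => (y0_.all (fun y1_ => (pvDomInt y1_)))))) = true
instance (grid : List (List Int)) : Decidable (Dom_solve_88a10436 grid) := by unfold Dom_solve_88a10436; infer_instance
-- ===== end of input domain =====

-- B replaces A's two scans and dense bounding-box pattern matrix (built and re-scanned)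
-- by one fused scan and a direct stamp of the sparse pattern-cell list: simpler, same result.

-- ===== PORT A =====
-- grid[r][c] (always in range where either program reaches it under Pre_)
def pvVal (grid : List (List Int)) (r c : Int) : Int :=
  PySem.List.pyGetD (PySem.List.pyGetD grid r []) c 0

-- out[r][c] = v (Python list assignment; a negative index wraps from the end)
def pvWrite (out : List (List Int)) (r c v : Int) : List (List Int) :=
  PySem.List.pySetD out r (PySem.List.pySetD (PySem.List.pyGetD out r []) c v)

-- A: first scan, position of the (last) 5
def pvFiveA (grid : List (List Int)) (rows cols : Int) : Int × Int :=
  (PySem.List.pyRange 0 rows 1).foldl (fun st r =>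
    (PySem.List.pyRange 0 cols 1).foldl (fun st c =>
      if pvVal grid r c = 5 then (r, c) else st) st) (-1, -1)

-- A: second scan, collect the non-zero non-5 cells
def pvCellsA (grid : List (List Int)) (rows cols : Int) : List (Int × Int × Int) :=
  (PySem.List.pyRange 0 rows 1).foldl (fun acc r =>
    (PySem.List.pyRange 0 cols 1).foldl (fun acc c =>
      if pvVal grid r c ≠ 0 ∧ pvVal grid r c ≠ 5 then acc ++ [(r, c, pvVal grid r c)] else acc) acc) []

-- A: dense matrix [[0]*pat_w for _ in range(pat_h)], then pattern[r-min_r][c-min_c] = v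
def pvPatternA (cells : List (Int × Int × Int)) (mr mc ph pw : Int) : List (List Int) :=
  cells.foldl (fun p t =>
      PySem.List.pySetD p (t.1 - mr)
        (PySem.List.pySetD (PySem.List.pyGetD p (t.1 - mr) []) (t.2.1 - mc) t.2.2))
    ((PySem.List.pyRange 0 ph 1).map (fun _ => PySem.List.pyRepeat [(0:Int)] pw))

-- A: re-scan the dense pattern matrix and copy its non-zero entries near the 5
def pvDenseA (pattern out1 : List (List Int)) (rows cols cmr cmc ph pw : Int) : List (List Int) :=
  (PySem.List.pyRange 0 ph 1).foldl (fun o r =>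
    (PySem.List.pyRange 0 pw 1).foldl (fun o c =>
      if pvVal pattern r c ≠ 0 then
        if 0 ≤ cmr + r ∧ cmr + r < rows ∧ 0 ≤ cmc + c ∧ cmc + c < cols then
          pvWrite o (cmr + r) (cmc + c) (pvVal pattern r c)
        else o
      else o) o) out1

def solve_88a10436 (grid : List (List Int)) : List (List Int) :=
  let rows : Int := PySem.List.len grid
  let cols : Int := PySem.List.len (PySem.List.pyGetD grid 0 [])
  let out := grid
  let five := pvFiveA grid rows cols
  let cells := pvCellsA grid rows cols
  if cells = [] then out
  else
    let pat_min_r := (PySem.List.min? (cells.map (fun t => t.1)) (fun x => x)).getD 0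
    let pat_max_r := (PySem.List.max? (cells.map (fun t => t.1)) (fun x => x)).getD 0
    let pat_min_c := (PySem.List.min? (cells.map (fun t => t.2.1)) (fun x => x)).getD 0
    let pat_max_c := (PySem.List.max? (cells.map (fun t => t.2.1)) (fun x => x)).getD 0
    let pat_h := pat_max_r - pat_min_r + 1
    let pat_w := pat_max_c - pat_min_c + 1
    let pattern := pvPatternA cells pat_min_r pat_min_c pat_h pat_w
    let out1 := pvWrite out five.1 five.2 0
    pvDenseA pattern out1 rows cols (five.1 - 1) (five.2 - 1) pat_h pat_w

-- ===== PORT B =====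
-- B: ONE fused scan: the last 5 seen and the sparse pattern-cell list together
def pvScanB (grid : List (List Int)) (rows cols : Int) : (Int × Int) × List (Int × Int × Int) :=
  (PySem.List.pyRange 0 rows 1).foldl (fun st r =>
    (PySem.List.pyRange 0 cols 1).foldl (fun st c =>
      let v := pvVal grid r c
      if v = 5 then ((r, c), st.2)
      else if v ≠ 0 then (st.1, st.2 ++ [(r, c, v)])
      else st) st) ((-1, -1), [])

-- B: stamp the sparse cells directly into the output (no dense matrix)
def pvStampB (cells : List (Int × Int × Int)) (five : Int × Int) (mr mc rows cols : Int)
    (out1 : List (List Int)) : List (List Int) :=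
  cells.foldl (fun o t =>
    if 0 ≤ five.1 - 1 + (t.1 - mr) ∧ five.1 - 1 + (t.1 - mr) < rows ∧
       0 ≤ five.2 - 1 + (t.2.1 - mc) ∧ five.2 - 1 + (t.2.1 - mc) < cols then
      pvWrite o (five.1 - 1 + (t.1 - mr)) (five.2 - 1 + (t.2.1 - mc)) t.2.2
    else o) out1

def solve_88a10436_alt (grid : List (List Int)) : List (List Int) :=
  let rows : Int := PySem.List.len grid
  let cols : Int := PySem.List.len (PySem.List.pyGetD grid 0 [])
  let s := pvScanB grid rows cols
  if s.2 = [] then grid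
  else
    let min_r := (PySem.List.min? (s.2.map (fun t => t.1)) (fun x => x)).getD 0
    let min_c := (PySem.List.min? (s.2.map (fun t => t.2.1)) (fun x => x)).getD 0
    pvStampB s.2 s.1 min_r min_c rows cols (pvWrite grid s.1.1 s.1.2 0)

-- ===== PRECONDITION & SPEC =====
-- Pre_ excludes exactly the inputs where the Python raises: the empty grid (grid[0] is an
-- IndexError) and ragged grids with some row shorter than row 0 (reading grid[r][c] raises).
def Pre_solve_88a10436 (grid : List (List Int)) : Prop :=
  grid ≠ [] ∧ ∀ row ∈ grid, (PySem.List.pyGetD grid 0 []).length ≤ row.length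
instance (grid : List (List Int)) : Decidable (Pre_solve_88a10436 grid) := by
  unfold Pre_solve_88a10436; infer_instance
def pvWitness_solve_88a10436 : List (List Int) := [[5, 0, 0], [1, 2, 0], [0, 0, 0]]

def Spec_solve_88a10436 (grid : List (List Int)) (out : List (List Int)) : Prop := out = solve_88a10436_alt grid
instance (grid : List (List Int)) (out : List (List Int)) : Decidable (Spec_solve_88a10436 grid out) := by unfold Spec_solve_88a10436; infer_instance

-- ===== CLAIM (what is proved, stated in full; the proofs are below) =====
def Claim_equal_solve_88a10436 : Prop := ∀ (grid : List (List Int)), Dom_solve_88a10436 grid → Pre_solve_88a10436 grid → Spec_solve_88a10436 grid (solve_88a10436 grid)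

-- ===== LEMMAS AND PROOFS =====

theorem pvScanB_eq (grid : List (List Int)) (rows cols : Int) :
    pvScanB grid rows cols = (pvFiveA grid rows cols, pvCellsA grid rows cols) := by
  unfold pvScanB pvFiveA pvCellsA
  have hinner : ∀ (r : Int),
      (fun (st : (Int × Int) × List (Int × Int × Int)) (c : Int) =>
        let v := pvVal grid r c
        if v = 5 then ((r, c), st.2)
        else if v ≠ 0 then (st.1, st.2 ++ [(r, c, v)])
        else st)
      = fun st c =>
        ((fun fv c => if pvVal grid r c = 5 then (r, c) else fv) st.1 c,
         (fun acc c => if pvVal grid r c ≠ 0 ∧ pvVal grid r c ≠ 5 then acc ++ [(r, c, pvVal grid r c)] else acc) st.2 c) := by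
    intro r; funext st c
    by_cases h5 : pvVal grid r c = 5 <;> by_cases h0 : pvVal grid r c = 0 <;>
      simp [h5, h0]
  have houter : (fun (st : (Int × Int) × List (Int × Int × Int)) (r : Int) =>
      (PySem.List.pyRange 0 cols 1).foldl
        (fun st c =>
          let v := pvVal grid r c
          if v = 5 then ((r, c), st.2)
          else if v ≠ 0 then (st.1, st.2 ++ [(r, c, v)])
          else st) st)
      = fun st r =>
        ((fun fv r => (PySem.List.pyRange 0 cols 1).foldl (fun fv c => if pvVal grid r c = 5 then (r, c) else fv) fv) st.1 r,
         (fun acc r => (PySem.List.pyRange 0 cols 1).foldl (fun acc c => if pvVal grid r c ≠ 0 ∧ pvVal grid r c ≠ 5 then acc ++ [(r, c, pvVal grid r c)] else acc) acc) st.2 r) := by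
    funext st r
    rw [hinner r]
    obtain ⟨a, b⟩ := st
    exact PySem.List.foldl_prod_mk
      (fun fv c => if pvVal grid r c = 5 then (r, c) else fv)
      (fun acc c => if pvVal grid r c ≠ 0 ∧ pvVal grid r c ≠ 5 then acc ++ [(r, c, pvVal grid r c)] else acc)
      _ a b
  rw [houter]
  exact PySem.List.foldl_prod_mk
    (fun fv r => (PySem.List.pyRange 0 cols 1).foldl (fun fv c => if pvVal grid r c = 5 then (r, c) else fv) fv)
    (fun acc r => (PySem.List.pyRange 0 cols 1).foldl (fun acc c => if pvVal grid r c ≠ 0 ∧ pvVal grid r c ≠ 5 then acc ++ [(r, c, pvVal grid r c)] else acc) acc)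
    _ _ _

theorem pvCellsA_eq (grid : List (List Int)) (rows cols : Int) :
    pvCellsA grid rows cols =
      (PySem.List.pyRange 0 rows 1).flatMap (fun r =>
        ((PySem.List.pyRange 0 cols 1).filter
            (fun c => decide (pvVal grid r c ≠ 0 ∧ pvVal grid r c ≠ 5))).map
          (fun c => (r, c, pvVal grid r c))) := by
  unfold pvCellsA
  have h : ∀ (r : Int) (acc : List (Int × Int × Int)),
      (PySem.List.pyRange 0 cols 1).foldl
        (fun acc c => if pvVal grid r c ≠ 0 ∧ pvVal grid r c ≠ 5 then acc ++ [(r, c, pvVal grid r c)] else acc) acc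
      = acc ++ ((PySem.List.pyRange 0 cols 1).filter
            (fun c => decide (pvVal grid r c ≠ 0 ∧ pvVal grid r c ≠ 5))).map
          (fun c => (r, c, pvVal grid r c)) := by
    intro r acc
    exact PySem.List.foldl_append_ite _ _ _ _
  simp only [h]
  exact PySem.List.foldl_append_eq_flatMap _ _ []

theorem mem_pvCellsA (grid : List (List Int)) (rows cols : Int) (t : Int × Int × Int) :
    t ∈ pvCellsA grid rows cols ↔
      0 ≤ t.1 ∧ t.1 < rows ∧ 0 ≤ t.2.1 ∧ t.2.1 < cols ∧
      pvVal grid t.1 t.2.1 ≠ 0 ∧ pvVal grid t.1 t.2.1 ≠ 5 ∧ t.2.2 = pvVal grid t.1 t.2.1 := by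
  obtain ⟨r, c, v⟩ := t
  rw [pvCellsA_eq]
  simp only [List.mem_flatMap, List.mem_map, List.mem_filter, PySem.List.mem_pyRange_one]
  constructor
  · rintro ⟨r', ⟨hr, c', ⟨⟨hc, hp⟩, heq⟩⟩⟩
    simp only [Prod.ext_iff] at heq
    obtain ⟨h1, h2, h3⟩ := heq
    subst h1; subst h2
    simp only [decide_eq_true_eq] at hp
    exact ⟨hr.1, hr.2, hc.1, hc.2, hp.1, hp.2, h3.symm⟩
  · rintro ⟨h1, h2, h3, h4, h5, h6, h7⟩
    exact ⟨r, ⟨⟨h1, h2⟩, c, ⟨⟨⟨h3, h4⟩, by simp [h5, h6]⟩, by simp [h7]⟩⟩⟩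

theorem pairwise_pvCellsA (grid : List (List Int)) (rows cols : Int) :
    (pvCellsA grid rows cols).Pairwise
      (fun t u => t.1 < u.1 ∨ (t.1 = u.1 ∧ t.2.1 < u.2.1)) := by
  rw [pvCellsA_eq]
  rw [List.pairwise_flatMap]
  constructor
  · intro r _
    refine List.Pairwise.map _ ?_ (List.Pairwise.filter _ (PySem.List.pairwise_lt_pyRange_one 0 cols))
    intro a b hab
    right; exact ⟨rfl, hab⟩
  · refine List.Pairwise.imp_of_mem ?_ (PySem.List.pairwise_lt_pyRange_one 0 rows)
    intro a b _ _ hab x hx y hy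
    simp only [List.mem_map, List.mem_filter] at hx hy
    obtain ⟨c1, _, rfl⟩ := hx
    obtain ⟨c2, _, rfl⟩ := hy
    left; exact hab

theorem pvVal_eq_zero (P : List (List Int)) (h : ∀ row ∈ P, ∀ x ∈ row, x = (0:Int))
    (i j : Int) : pvVal P i j = 0 := by
  unfold pvVal
  by_cases hi : PySem.Raise.InRange P.length i
  · have hrow := PySem.List.pyGetD_mem P ([] : List Int) hi
    by_cases hj : PySem.Raise.InRange (PySem.List.pyGetD P i []).length j
    · exact h _ hrow _ (PySem.List.pyGetD_mem _ _ hj)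
    · exact PySem.List.pyGetD_of_none _ _ _ ((PySem.List.pyGet?_eq_none_iff _ _).2 hj)
  · rw [PySem.List.pyGetD_of_none _ _ _ ((PySem.List.pyGet?_eq_none_iff _ _).2 hi)]
    by_cases hj : PySem.Raise.InRange ([] : List Int).length j
    · simp [PySem.Raise.InRange] at hj; omega
    · exact PySem.List.pyGetD_of_none _ _ _ ((PySem.List.pyGet?_eq_none_iff _ _).2 hj)

theorem pvVal_pvWrite (P : List (List Int)) (a b v : Int)
    (ha0 : 0 ≤ a) (ha : a < (P.length : Int)) (hb0 : 0 ≤ b)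
    (hb : b < ((PySem.List.pyGetD P a []).length : Int)) (i j : Int)
    (hi : 0 ≤ i) (hj : 0 ≤ j) :
    pvVal (pvWrite P a b v) i j = if i = a ∧ j = b then v else pvVal P i j := by
  unfold pvVal pvWrite
  rw [PySem.List.pySetD_of_nonneg _ _ ha0, PySem.List.pySetD_of_nonneg _ _ hb0]
  rw [PySem.List.pyGetD_of_nonneg _ ([] : List Int) hi,
      PySem.List.pyGetD_of_nonneg (xs := P) ([] : List Int) hi]
  rw [List.getD_eq_getElem?_getD, List.getD_eq_getElem?_getD (l := P), List.getElem?_set]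
  by_cases hia : i = a
  · have hai : a.toNat = i.toNat := by omega
    rw [if_pos hai, if_pos (by omega)]
    simp only [Option.getD_some]
    rw [PySem.List.pyGetD_of_nonneg _ (0 : Int) hj,
        PySem.List.pyGetD_of_nonneg _ (0 : Int) hj]
    rw [List.getD_eq_getElem?_getD, List.getD_eq_getElem?_getD, List.getElem?_set]
    by_cases hjb : j = b
    · have hbn : b.toNat = j.toNat := by omega
      rw [if_pos hbn, if_pos (by omega)]
      rw [if_pos ⟨hia, hjb⟩]
      rfl
    · rw [if_neg (by omega), if_neg (by omega : ¬(i = a ∧ j = b))]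
      subst hia
      rw [PySem.List.pyGetD_of_nonneg P ([] : List Int) hi,
          List.getD_eq_getElem?_getD]
  · rw [if_neg (by omega), if_neg (by omega : ¬(i = a ∧ j = b))]

theorem pvStampFold_lookup (mr mc : Int) (V : Int → Int → Int) :
    ∀ (l : List (Int × Int × Int)) (P : List (List Int)) (W : Nat)
      (_ : ∀ row ∈ P, row.length = W)
      (_ : ∀ t ∈ l, 0 ≤ t.1 - mr ∧ t.1 - mr < (P.length : Int) ∧ 0 ≤ t.2.1 - mc ∧
            t.2.1 - mc < (W : Int) ∧ t.2.2 = V t.1 t.2.1)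
      (i j : Int), 0 ≤ i → 0 ≤ j →
      pvVal (l.foldl (fun p t => pvWrite p (t.1 - mr) (t.2.1 - mc) t.2.2) P) i j
        = if ∃ t ∈ l, t.1 - mr = i ∧ t.2.1 - mc = j then V (mr + i) (mc + j)
          else pvVal P i j := by
  intro l
  induction l with
  | nil => intro P W hrow hb i j hi hj; simp
  | cons t l ih =>
    intro P W hrow hb i j hi hj
    simp only [List.foldl_cons]
    have hbt := hb t (by simp)
    have hain : PySem.Raise.InRange P.length (t.1 - mr) := ⟨by omega, by omega⟩
    have hrowmem : PySem.List.pyGetD P (t.1 - mr) [] ∈ P :=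
      PySem.List.pyGetD_mem _ _ hain
    have hrowlen : (PySem.List.pyGetD P (t.1 - mr) []).length = W := hrow _ hrowmem
    have hlenP' : (pvWrite P (t.1 - mr) (t.2.1 - mc) t.2.2).length = P.length := by
      unfold pvWrite; rw [PySem.List.length_pySetD]
    have hrow' : ∀ row ∈ pvWrite P (t.1 - mr) (t.2.1 - mc) t.2.2, row.length = W := by
      intro row hm
      unfold pvWrite at hm
      rw [PySem.List.pySetD_of_nonneg _ _ (by omega)] at hm
      rcases List.mem_or_eq_of_mem_set hm with h | h
      · exact hrow _ h
      · subst h; rw [PySem.List.length_pySetD]; exact hrowlen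
    rw [ih _ W hrow'
        (fun u hu => by
          have h := hb u (List.mem_cons_of_mem _ hu)
          rw [hlenP']
          exact h) i j hi hj]
    by_cases h1 : ∃ u ∈ l, u.1 - mr = i ∧ u.2.1 - mc = j
    · obtain ⟨u, hu, hc⟩ := h1
      rw [if_pos ⟨u, hu, hc⟩, if_pos ⟨u, List.mem_cons_of_mem _ hu, hc⟩]
    · rw [if_neg h1]
      rw [pvVal_pvWrite P _ _ _ (by omega) (by omega) (by omega)
            (by rw [hrowlen]; omega) i j hi hj]
      by_cases h2 : i = t.1 - mr ∧ j = t.2.1 - mc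
      · rw [if_pos h2, if_pos ⟨t, by simp, by omega, by omega⟩]
        have e1 : t.1 = mr + i := by omega
        have e2 : t.2.1 = mc + j := by omega
        rw [hbt.2.2.2.2, e1, e2]
      · rw [if_neg h2, if_neg (by
          rintro ⟨u, hu, hc⟩
          rcases List.mem_cons.1 hu with rfl | hm
          · exact h2 ⟨hc.1.symm, hc.2.symm⟩
          · exact h1 ⟨u, hm, hc⟩)]

theorem pvKey_lt (pw r c r' c' : Int) (h0 : 0 ≤ c) (h1 : c < pw) (h2 : 0 ≤ c')
    (h : r < r' ∨ (r = r' ∧ c < c')) : r * pw + c < r' * pw + c' := by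
  rcases h with h | ⟨rfl, h⟩
  · have h3 : r * pw + pw ≤ r' * pw := by nlinarith
    linarith
  · linarith

theorem pvKey_inj (pw r c r' c' : Int) (h0 : 0 ≤ c) (h1 : c < pw) (h2 : 0 ≤ c')
    (h3 : c' < pw) (h : r * pw + c = r' * pw + c') : r = r' ∧ c = c' := by
  rcases lt_trichotomy r r' with hr | hr | hr
  · have := pvKey_lt pw r c r' c' h0 h1 h2 (Or.inl hr); omega
  · subst hr; constructor <;> nlinarith
  · have := pvKey_lt pw r' c' r c h2 h3 h0 (Or.inl hr); omega

theorem dense_eq_stamp (grid : List (List Int)) (rows cols : Int) (five : Int × Int)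
    (pmr pMr pmc pMc : Int)
    (hne : pvCellsA grid rows cols ≠ [])
    (hpmr : PySem.List.min? ((pvCellsA grid rows cols).map (fun t => t.1)) (fun x => x) = some pmr)
    (hpMr : PySem.List.max? ((pvCellsA grid rows cols).map (fun t => t.1)) (fun x => x) = some pMr)
    (hpmc : PySem.List.min? ((pvCellsA grid rows cols).map (fun t => t.2.1)) (fun x => x) = some pmc)
    (hpMc : PySem.List.max? ((pvCellsA grid rows cols).map (fun t => t.2.1)) (fun x => x) = some pMc)
    (out1 : List (List Int)) :
    pvDenseA (pvPatternA (pvCellsA grid rows cols) pmr pmc (pMr - pmr + 1) (pMc - pmc + 1))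
        out1 rows cols (five.1 - 1) (five.2 - 1) (pMr - pmr + 1) (pMc - pmc + 1)
      = pvStampB (pvCellsA grid rows cols) five pmr pmc rows cols out1 := by
  set cells := pvCellsA grid rows cols with hc
  set ph := pMr - pmr + 1 with hph'
  set pw := pMc - pmc + 1 with hpw'
  have hminr : ∀ t ∈ cells, pmr ≤ t.1 := fun t ht =>
    PySem.List.min?_isMin hpmr t.1 (List.mem_map_of_mem ht)
  have hmaxr : ∀ t ∈ cells, t.1 ≤ pMr := fun t ht =>
    PySem.List.max?_isMax hpMr t.1 (List.mem_map_of_mem ht)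
  have hminc : ∀ t ∈ cells, pmc ≤ t.2.1 := fun t ht =>
    PySem.List.min?_isMin hpmc t.2.1 (List.mem_map_of_mem ht)
  have hmaxc : ∀ t ∈ cells, t.2.1 ≤ pMc := fun t ht =>
    PySem.List.max?_isMax hpMc t.2.1 (List.mem_map_of_mem ht)
  have hbnd : ∀ t ∈ cells, 0 ≤ t.1 - pmr ∧ t.1 - pmr < ph ∧ 0 ≤ t.2.1 - pmc ∧ t.2.1 - pmc < pw := by
    intro t ht
    have h1 := hminr t ht; have h2 := hmaxr t ht
    have h3 := hminc t ht; have h4 := hmaxc t ht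
    omega
  obtain ⟨t0, ht0⟩ := List.exists_mem_of_ne_nil cells hne
  have hph : 0 < ph := by have := hbnd t0 ht0; omega
  have hpw : 0 < pw := by have := hbnd t0 ht0; omega
  set P0 := (PySem.List.pyRange 0 ph 1).map (fun _ => PySem.List.pyRepeat [(0:Int)] pw) with hP0
  have hlenP0 : (P0.length : Int) = ph := by
    rw [hP0, List.length_map, PySem.List.length_pyRange_one]; omega
  have hrowP0 : ∀ row ∈ P0, row.length = pw.toNat := by
    intro row h
    rw [hP0] at h
    obtain ⟨_, _, rfl⟩ := List.mem_map.1 h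
    rw [PySem.List.pyRepeat_singleton, List.length_replicate]
  have hzero : ∀ i j : Int, pvVal P0 i j = 0 := by
    intro i j
    refine pvVal_eq_zero P0 ?_ i j
    intro row hr x hx
    rw [hP0] at hr
    obtain ⟨_, _, rfl⟩ := List.mem_map.1 hr
    rw [PySem.List.pyRepeat_singleton] at hx
    exact List.eq_of_mem_replicate hx
  have hb' : ∀ t ∈ cells, 0 ≤ t.1 - pmr ∧ t.1 - pmr < (P0.length : Int) ∧ 0 ≤ t.2.1 - pmc ∧
      t.2.1 - pmc < ((pw.toNat : Nat) : Int) ∧ t.2.2 = pvVal grid t.1 t.2.1 := by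
    intro t ht
    have h1 := hbnd t ht
    have h2 := (mem_pvCellsA grid rows cols t).1 ht
    rw [hlenP0]
    refine ⟨h1.1, h1.2.1, h1.2.2.1, by omega, h2.2.2.2.2.2.2⟩
  have hlook : ∀ i j : Int, 0 ≤ i → 0 ≤ j →
      pvVal (pvPatternA cells pmr pmc ph pw) i j
        = if ∃ t ∈ cells, t.1 - pmr = i ∧ t.2.1 - pmc = j then pvVal grid (pmr + i) (pmc + j)
          else 0 := by
    intro i j hi hj
    show pvVal (cells.foldl (fun p t => pvWrite p (t.1 - pmr) (t.2.1 - pmc) t.2.2) P0) i j = _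
    rw [pvStampFold_lookup pmr pmc (fun r c => pvVal grid r c) cells P0 pw.toNat hrowP0 hb' i j hi hj]
    rw [hzero i j]
  set pat := pvPatternA cells pmr pmc ph pw with hpat
  set E := (PySem.List.pyRange 0 ph 1).flatMap
      (fun r => (PySem.List.pyRange 0 pw 1).map (fun c => (r, c))) with hE
  have hmemE : ∀ i j : Int, (i, j) ∈ E ↔ 0 ≤ i ∧ i < ph ∧ 0 ≤ j ∧ j < pw := by
    intro i j
    rw [hE]
    simp only [List.mem_flatMap, List.mem_map, PySem.List.mem_pyRange_one, Prod.mk.injEq]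
    constructor
    · rintro ⟨r, hr, c, hc, rfl, rfl⟩; exact ⟨hr.1, hr.2, hc.1, hc.2⟩
    · rintro ⟨h1, h2, h3, h4⟩; exact ⟨i, ⟨h1, h2⟩, j, ⟨h3, h4⟩, rfl, rfl⟩
  have hdense : pvDenseA pat out1 rows cols (five.1 - 1) (five.2 - 1) ph pw
      = (E.filter (fun ij => decide (pvVal pat ij.1 ij.2 ≠ 0))).foldl
          (fun o ij =>
            if 0 ≤ five.1 - 1 + ij.1 ∧ five.1 - 1 + ij.1 < rows ∧
               0 ≤ five.2 - 1 + ij.2 ∧ five.2 - 1 + ij.2 < cols then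
              pvWrite o (five.1 - 1 + ij.1) (five.2 - 1 + ij.2) (pvVal pat ij.1 ij.2)
            else o) out1 := by
    rw [← PySem.List.foldl_ite_eq_foldl_filter
          (fun ij : Int × Int => pvVal pat ij.1 ij.2 ≠ 0)
          (fun o ij =>
            if 0 ≤ five.1 - 1 + ij.1 ∧ five.1 - 1 + ij.1 < rows ∧
               0 ≤ five.2 - 1 + ij.2 ∧ five.2 - 1 + ij.2 < cols then
              pvWrite o (five.1 - 1 + ij.1) (five.2 - 1 + ij.2) (pvVal pat ij.1 ij.2)
            else o) E out1]
    rw [hE, List.foldl_flatMap]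
    simp only [List.foldl_map]
    rfl
  have hEpw : E.Pairwise (fun a b : Int × Int => a.1 * pw + a.2 < b.1 * pw + b.2) := by
    rw [hE, List.pairwise_flatMap]
    constructor
    · intro r _
      exact List.Pairwise.map _ (fun a b hab => by simpa using (by omega : r * pw + a < r * pw + b))
        (PySem.List.pairwise_lt_pyRange_one 0 pw)
    · refine List.Pairwise.imp_of_mem ?_ (PySem.List.pairwise_lt_pyRange_one 0 ph)
      intro a b _ _ hab x hx y hy
      obtain ⟨c1, hc1, rfl⟩ := List.mem_map.1 hx
      obtain ⟨c2, hc2, rfl⟩ := List.mem_map.1 hy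
      rw [PySem.List.mem_pyRange_one] at hc1 hc2
      exact pvKey_lt pw a c1 b c2 hc1.1 hc1.2 hc2.1 (Or.inl hab)
  have hCpw : (cells.map (fun t => (t.1 - pmr, t.2.1 - pmc))).Pairwise
      (fun a b : Int × Int => a.1 * pw + a.2 < b.1 * pw + b.2) := by
    refine List.Pairwise.map _ (fun a b hab => hab) ?_
    refine List.Pairwise.imp_of_mem ?_ (pairwise_pvCellsA grid rows cols)
    intro a b ha hb hab
    have hba := hbnd a ha
    have hbb := hbnd b hb
    exact pvKey_lt pw (a.1 - pmr) (a.2.1 - pmc) (b.1 - pmr) (b.2.1 - pmc)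
      hba.2.2.1 hba.2.2.2 hbb.2.2.1 (by
        rcases hab with h | ⟨h, h2⟩
        · exact Or.inl (by omega)
        · exact Or.inr ⟨by omega, by omega⟩)
  have hfilpw : (E.filter (fun ij => decide (pvVal pat ij.1 ij.2 ≠ 0))).Pairwise
      (fun a b : Int × Int => a.1 * pw + a.2 < b.1 * pw + b.2) := hEpw.filter _
  have hmemiff : ∀ x : Int × Int,
      x ∈ E.filter (fun ij => decide (pvVal pat ij.1 ij.2 ≠ 0)) ↔
      x ∈ cells.map (fun t => (t.1 - pmr, t.2.1 - pmc)) := by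
    rintro ⟨i, j⟩
    rw [List.mem_filter, hmemE i j]
    simp only [decide_eq_true_eq]
    constructor
    · rintro ⟨⟨h1, h2, h3, h4⟩, hv⟩
      rw [hlook i j h1 h3] at hv
      by_cases hex : ∃ t ∈ cells, t.1 - pmr = i ∧ t.2.1 - pmc = j
      · obtain ⟨t, ht, e1, e2⟩ := hex
        exact List.mem_map.2 ⟨t, ht, by rw [e1, e2]⟩
      · rw [if_neg hex] at hv; exact absurd rfl hv
    · intro hx
      obtain ⟨t, ht, heq⟩ := List.mem_map.1 hx
      obtain ⟨rfl, rfl⟩ : t.1 - pmr = i ∧ t.2.1 - pmc = j :=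
        ⟨congrArg Prod.fst heq, congrArg Prod.snd heq⟩
      have h1 := hbnd t ht
      have h2 := (mem_pvCellsA grid rows cols t).1 ht
      refine ⟨⟨h1.1, h1.2.1, h1.2.2.1, h1.2.2.2⟩, ?_⟩
      rw [hlook _ _ h1.1 h1.2.2.1, if_pos ⟨t, ht, rfl, rfl⟩]
      rw [show pmr + (t.1 - pmr) = t.1 by ring, show pmc + (t.2.1 - pmc) = t.2.1 by ring]
      exact h2.2.2.2.2.1
  have hperm : (E.filter (fun ij => decide (pvVal pat ij.1 ij.2 ≠ 0))).Perm
      (cells.map (fun t => (t.1 - pmr, t.2.1 - pmc))) := by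
    refine (List.perm_ext_iff_of_nodup ?_ ?_).2 hmemiff
    · exact List.Pairwise.imp (fun h => by rintro rfl; exact lt_irrefl _ h) hfilpw
    · exact List.Pairwise.imp (fun h => by rintro rfl; exact lt_irrefl _ h) hCpw
  have hfil : E.filter (fun ij => decide (pvVal pat ij.1 ij.2 ≠ 0))
      = cells.map (fun t => (t.1 - pmr, t.2.1 - pmc)) := by
    refine List.Perm.eq_of_pairwise ?_
      (hfilpw.imp (fun h => le_of_lt h)) (hCpw.imp (fun h => le_of_lt h)) hperm
    intro a b ha hb hab hba
    have hkey : a.1 * pw + a.2 = b.1 * pw + b.2 := le_antisymm hab hba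
    have haE := (List.mem_filter.1 ha).1
    obtain ⟨i, j⟩ := a
    obtain ⟨i', j'⟩ := b
    have h1 := (hmemE i j).1 haE
    obtain ⟨t, ht, heq⟩ := List.mem_map.1 hb
    obtain ⟨rfl, rfl⟩ : t.1 - pmr = i' ∧ t.2.1 - pmc = j' :=
      ⟨congrArg Prod.fst heq, congrArg Prod.snd heq⟩
    have h2 := hbnd t ht
    have := pvKey_inj pw i j (t.1 - pmr) (t.2.1 - pmc) h1.2.2.1 h1.2.2.2 h2.2.2.1 h2.2.2.2 hkey
    simp [this.1, this.2]
  rw [hdense, hfil, List.foldl_map]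
  unfold pvStampB
  refine PySem.List.foldl_congr_mem _ _ _ _ ?_
  intro o t ht
  have hv : pvVal pat (t.1 - pmr) (t.2.1 - pmc) = t.2.2 := by
    have h1 := hbnd t ht
    have h2 := (mem_pvCellsA grid rows cols t).1 ht
    rw [hlook _ _ h1.1 h1.2.2.1, if_pos ⟨t, ht, rfl, rfl⟩]
    rw [show pmr + (t.1 - pmr) = t.1 by ring, show pmc + (t.2.1 - pmc) = t.2.1 by ring]
    exact h2.2.2.2.2.2.2.symm
  rw [hv]


-- ===== VERDICT (by name: the statement is the Claim_ definition above) =====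
theorem solve_88a10436_spec : Claim_equal_solve_88a10436 := by
  intro grid _ _
  unfold Spec_solve_88a10436 solve_88a10436 solve_88a10436_alt
  simp only [pvScanB_eq]
  by_cases hne : pvCellsA grid (PySem.List.len grid) (PySem.List.len (PySem.List.pyGetD grid 0 [])) = []
  · rw [if_pos hne, if_pos hne]
  · rw [if_neg hne, if_neg hne]
    obtain ⟨pmr, hpmr⟩ : ∃ m, PySem.List.min? ((pvCellsA grid (PySem.List.len grid) (PySem.List.len (PySem.List.pyGetD grid 0 []))).map (fun t => t.1)) (fun x => x) = some m := by
      cases h : PySem.List.min? ((pvCellsA grid (PySem.List.len grid) (PySem.List.len (PySem.List.pyGetD grid 0 []))).map (fun t => t.1)) (fun x => x) with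
      | none => rw [PySem.List.min?_eq_none_iff, List.map_eq_nil_iff] at h; exact absurd h hne
      | some m => exact ⟨m, rfl⟩
    obtain ⟨pMr, hpMr⟩ : ∃ m, PySem.List.max? ((pvCellsA grid (PySem.List.len grid) (PySem.List.len (PySem.List.pyGetD grid 0 []))).map (fun t => t.1)) (fun x => x) = some m := by
      cases h : PySem.List.max? ((pvCellsA grid (PySem.List.len grid) (PySem.List.len (PySem.List.pyGetD grid 0 []))).map (fun t => t.1)) (fun x => x) with
      | none => rw [PySem.List.max?_eq_none_iff, List.map_eq_nil_iff] at h; exact absurd h hne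
      | some m => exact ⟨m, rfl⟩
    obtain ⟨pmc, hpmc⟩ : ∃ m, PySem.List.min? ((pvCellsA grid (PySem.List.len grid) (PySem.List.len (PySem.List.pyGetD grid 0 []))).map (fun t => t.2.1)) (fun x => x) = some m := by
      cases h : PySem.List.min? ((pvCellsA grid (PySem.List.len grid) (PySem.List.len (PySem.List.pyGetD grid 0 []))).map (fun t => t.2.1)) (fun x => x) with
      | none => rw [PySem.List.min?_eq_none_iff, List.map_eq_nil_iff] at h; exact absurd h hne
      | some m => exact ⟨m, rfl⟩
    obtain ⟨pMc, hpMc⟩ : ∃ m, PySem.List.max? ((pvCellsA grid (PySem.List.len grid) (PySem.List.len (PySem.List.pyGetD grid 0 []))).map (fun t => t.2.1)) (fun x => x) = some m := by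
      cases h : PySem.List.max? ((pvCellsA grid (PySem.List.len grid) (PySem.List.len (PySem.List.pyGetD grid 0 []))).map (fun t => t.2.1)) (fun x => x) with
      | none => rw [PySem.List.max?_eq_none_iff, List.map_eq_nil_iff] at h; exact absurd h hne
      | some m => exact ⟨m, rfl⟩
    rw [hpmr, hpMr, hpmc, hpMc]
    simp only [Option.getD_some]
    exact dense_eq_stamp grid _ _ _ pmr pMr pmc pMc hne hpmr hpMr hpmc hpMc _
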